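-- pv_equiv track=rewrite | github.com/Ashim986/LeetPulseTestGenerator | Scripts/generate_tests.py | wrap_in_namespace
-- ===== SOURCE A (Python) =====
-- def slug_to_enum_name(slug: str) -> str:
--     """Convert 'two-sum' to 'LCTwoSum' for namespace enum.
--     Uses UpperCamelCase to satisfy SwiftLint type_name rule."""
--     parts = slug.split("-")
--     camel = "".join(p.capitalize() for p in parts)
--     name = "LC" + camel
--     # Swift type names can't start with a digit after LC prefix
--     return name
--
-- def wrap_in_namespace(output: str, slug: str) -> str:
--     """Wrap generated Swift code in enum LCSlugName { ... } namespace.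
--
--     Import statements stay outside the enum. Everything else (typealias, Solution class,
--     @Suite struct, etc.) is indented by 4 spaces inside the enum.
--     The @Test functions become static since they're inside an enum.
--     """
--     enum_name = slug_to_enum_name(slug)
--     lines = output.split("\n")
--     import_lines = []
--     body_lines = []
--
--     # Separate import lines from body
--     in_imports = True
--     for line in lines:
--         stripped = line.strip()
--         if in_imports and (stripped.startswith("import ") or stripped.startswith("@testable import ") or stripped == ""):
--             import_lines.append(line)
--             # Stop import section after first non-import non-blank line
--             if stripped == "" and body_lines:
--                 in_imports = False
--         else:
--             in_imports = False
--             body_lines.append(line)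
--
--     # Remove trailing empty lines from imports (we'll add our own spacing)
--     while import_lines and import_lines[-1].strip() == "":
--         import_lines.pop()
--
--     # Indent body lines by 4 spaces inside the enum
--     indented_body = []
--     for line in body_lines:
--         if line.strip() == "":
--             indented_body.append("")
--         else:
--             indented_body.append("    " + line)
--
--     # Make @Test functions static inside the enum namespace
--     # Replace "@Test func" with "@Test static func" in the indented body
--     # Also handle parameterized pattern where @Test(arguments:) is on a separate line from func
--     for i, line in enumerate(indented_body):
--         if "@Test func" in line and "static" not in line:
--             indented_body[i] = line.replace("@Test func", "@Test static func")
--     # Handle case: @Test(arguments:...) on line N, func run(...) on line N+1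
--     for i, line in enumerate(indented_body):
--         stripped = line.strip()
--         if stripped.startswith("func ") and "static" not in line:
--             # Check if previous non-blank line is @Test(arguments:...)
--             for j in range(i - 1, -1, -1):
--                 prev = indented_body[j].strip()
--                 if prev == "":
--                     continue
--                 if prev.startswith("@Test(arguments:"):
--                     indented_body[i] = line.replace("func ", "static func ", 1)
--                 break
--
--     # Build final output
--     result_lines = import_lines
--     result_lines.append("")
--     result_lines.append(f"enum {enum_name} {{")
--     result_lines.extend(indented_body)
--     # Ensure proper closing
--     if result_lines and result_lines[-1].strip() == "":
--         result_lines.append("}")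
--     else:
--         result_lines.append("")
--         result_lines.append("}")
--     result_lines.append("")
--
--     return "\n".join(result_lines)
-- ===== SOURCE B (Python) =====
-- def slug_to_enum_name(slug: str) -> str:
--     parts = slug.split("-")
--     camel = "".join(p.capitalize() for p in parts)
--     return "LC" + camel
--
--
-- def wrap_in_namespace(output: str, slug: str) -> str:
--     """Single fused pass: the import prefix is split off with an index scan, and the
--     body is indented, @Test-rewritten and static-marked in ONE forward pass that
--     carries the stripped text of the nearest earlier non-blank processed line,
--     instead of A's three passes with a nested backward scan."""
--     enum_name = slug_to_enum_name(slug)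
--     lines = output.split("\n")
--
--     # import section = longest prefix of import/blank lines
--     n = 0
--     while n < len(lines):
--         s = lines[n].strip()
--         if s.startswith("import ") or s.startswith("@testable import ") or s == "":
--             n += 1
--         else:
--             break
--     import_lines = lines[:n]
--     body_lines = lines[n:]
--
--     # drop trailing blank lines from the import section
--     k = len(import_lines)
--     while k > 0 and import_lines[k - 1].strip() == "":
--         k -= 1
--     import_lines = import_lines[:k]
--
--     # one pass: indent, make @Test funcs static, track previous non-blank line
--     prev = None
--     processed = []
--     for raw in body_lines:
--         if raw.strip() == "":
--             out = ""
--         else: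
--             line = "    " + raw
--             if "@Test func" in line and "static" not in line:
--                 line = line.replace("@Test func", "@Test static func")
--             if (line.strip().startswith("func ") and "static" not in line
--                     and prev is not None and prev.startswith("@Test(arguments:")):
--                 line = line.replace("func ", "static func ", 1)
--             out = line
--         s = out.strip()
--         if s:
--             prev = s
--         processed.append(out)
--
--     tail = ["}"] if processed and processed[-1].strip() == "" else ["", "}"]
--     return "\n".join(import_lines + ["", "enum " + enum_name + " {"] + processed + tail + [""])
-- ===== Notes on version B (the rewrite author's own statement) =====
-- stated objective: alternative
-- what changed: B splits the import prefix off with a takeWhile-style index scan and rewrites the body (indent, @Test replacement, static-marking) in ONE fused forward pass that carries the stripped text of the nearest earlier non-blank processed line, replacing A's three separate passes whose static-marking loop re-scans backward over earlier lines for each func line.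
import Mathlib
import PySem

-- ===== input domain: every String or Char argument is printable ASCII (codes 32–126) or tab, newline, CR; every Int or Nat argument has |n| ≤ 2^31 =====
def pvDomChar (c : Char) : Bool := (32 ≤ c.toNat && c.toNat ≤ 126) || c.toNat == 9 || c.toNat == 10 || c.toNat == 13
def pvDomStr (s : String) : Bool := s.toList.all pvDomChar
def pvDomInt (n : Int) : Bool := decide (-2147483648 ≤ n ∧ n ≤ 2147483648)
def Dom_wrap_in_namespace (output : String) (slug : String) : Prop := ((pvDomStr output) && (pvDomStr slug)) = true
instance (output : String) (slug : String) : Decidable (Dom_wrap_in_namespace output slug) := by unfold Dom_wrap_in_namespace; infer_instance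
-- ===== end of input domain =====

-- B rewrites the body in ONE forward pass carrying the previous non-blank stripped line,
-- instead of A's separate indent / @Test-replace / static-marking passes with a nested
-- backward scan; objective: alternative decomposition (no measured speed claim).

-- ===== shared string primitives (ports of Python built-ins PySem does not provide) =====

-- p.capitalize() — exact on the ASCII domain: first char uppercased, the rest lowercased
def pyCapitalize (s : String) : String :=
  match s.toList with
  | [] => ""
  | c :: cs => String.ofList (PySem.Chars.upperChar c :: PySem.Chars.lower cs)

-- s.replace(old, new, 1) — replace the FIRST occurrence only (Python semantics, incl. old = "")
def replaceFirst (s old new : String) : String :=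
  let cs := s.toList
  let o := old.toList
  let i := PySem.Chars.find cs o
  if i < 0 then s
  else String.ofList (cs.take i.toNat ++ new.toList ++ cs.drop (i.toNat + o.length))

-- slug_to_enum_name (identical helper in both Pythons)
def slug_to_enum_name (slug : String) : String :=
  let parts := (PySem.Str.split? slug "-").getD []   -- sep "-" ≠ "" so split? is always some
  let camel := PySem.Str.join "" (parts.map pyCapitalize)
  "LC" ++ camel

-- ===== PORT A =====

-- A: while import_lines and import_lines[-1].strip() == "": import_lines.pop()
def popTrailingBlank (l : List String) : List String :=
  if h : l ≠ [] ∧ PySem.Str.strip (l.getLastD "") == "" then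
    popTrailingBlank l.dropLast
  else l
termination_by l.length
decreasing_by
  have : l.length ≠ 0 := fun hz => h.1 (List.length_eq_zero_iff.mp hz)
  simp [List.length_dropLast]; omega

-- A: inner backward scan — for j in range(i-1,-1,-1): skip blanks, stop at first non-blank
def scanPrev (acc : List String) : Nat → Option String
  | 0 => none
  | j + 1 =>
    let prev := PySem.Str.strip (acc.getD j "")   -- index j is always in range when called
    if prev == "" then scanPrev acc j else some prev

def wrap_in_namespace (output : String) (slug : String) : String :=
  let enum_name := slug_to_enum_name slug
  let lines := (PySem.Str.split? output "\n").getD []   -- "\n" ≠ "" so always some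
  -- separate import lines from body (state: in_imports, import_lines, body_lines)
  let st := lines.foldl
    (fun (st : Bool × List String × List String) line =>
      let in_imports := st.1
      let import_lines := st.2.1
      let body_lines := st.2.2
      let stripped := PySem.Str.strip line
      if in_imports &&
          (PySem.Str.startswith stripped "import " ||
            PySem.Str.startswith stripped "@testable import " || stripped == "") then
        let import_lines := import_lines ++ [line]
        if stripped == "" && !body_lines.isEmpty then (false, import_lines, body_lines)
        else (in_imports, import_lines, body_lines)
      else (false, import_lines, body_lines ++ [line]))
    (true, [], [])
  let import_lines := popTrailingBlank st.2.1
  let body_lines := st.2.2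
  -- indent body lines by 4 spaces
  let indented := body_lines.map (fun line =>
    if PySem.Str.strip line == "" then "" else "    " ++ line)
  -- pass 1: "@Test func" -> "@Test static func" (in-place updates, index i always in range)
  let p1 := (List.range indented.length).foldl
    (fun acc i =>
      let line := acc.getD i ""
      if PySem.Str.isIn "@Test func" line && !PySem.Str.isIn "static" line then
        acc.set i (PySem.Str.replace line "@Test func" "@Test static func")
      else acc)
    indented
  -- pass 2: func after @Test(arguments:...) line becomes static (backward scan for prev)
  let p2 := (List.range p1.length).foldl
    (fun acc i =>
      let line := acc.getD i ""
      let stripped := PySem.Str.strip line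
      if PySem.Str.startswith stripped "func " && !PySem.Str.isIn "static" line then
        match scanPrev acc i with
        | some prev =>
          if PySem.Str.startswith prev "@Test(arguments:" then
            acc.set i (replaceFirst line "func " "static func ")
          else acc
        | none => acc
      else acc)
    p1
  let result := import_lines ++ [""] ++ ["enum " ++ enum_name ++ " {"] ++ p2
  -- if result_lines and result_lines[-1].strip() == ""
  let lastBlank := match result.getLast? with
    | some s => PySem.Str.strip s == ""
    | none => false
  let result := if lastBlank then result ++ ["}"] else result ++ [""] ++ ["}"]
  PySem.Str.join "\n" (result ++ [""])

-- ===== PORT B =====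

-- B: while n < len(lines) and lines[n] is an import/blank line: n += 1
def importPrefixLen (lines : List String) (n : Nat) : Nat :=
  if h : n < lines.length then
    let s := PySem.Str.strip (lines.getD n "")
    if PySem.Str.startswith s "import " || PySem.Str.startswith s "@testable import " || s == "" then
      importPrefixLen lines (n + 1)
    else n
  else n
termination_by lines.length - n

-- B: while k > 0 and import_lines[k-1].strip() == "": k -= 1
def dropBlankLen (l : List String) : Nat → Nat
  | 0 => 0
  | k + 1 => if PySem.Str.strip (l.getD k "") == "" then dropBlankLen l k else k + 1

-- B: the single fused pass (indent + both @Test rewrites), carrying prev = stripped text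
-- of the nearest earlier non-blank processed line
def fusePass : List String → Option String → List String × Option String
  | [], prev => ([], prev)
  | raw :: rest, prev =>
    let out :=
      if PySem.Str.strip raw == "" then ""
      else
        let line := "    " ++ raw
        let line :=
          if PySem.Str.isIn "@Test func" line && !PySem.Str.isIn "static" line then
            PySem.Str.replace line "@Test func" "@Test static func"
          else line
        if PySem.Str.startswith (PySem.Str.strip line) "func " && !PySem.Str.isIn "static" line &&
            (match prev with
             | some p => PySem.Str.startswith p "@Test(arguments:"
             | none => false) then
          replaceFirst line "func " "static func "
        else line
    let s := PySem.Str.strip out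
    let prev' := if s == "" then prev else some s
    let r := fusePass rest prev'
    (out :: r.1, r.2)

def wrap_in_namespace_alt (output : String) (slug : String) : String :=
  let enum_name := slug_to_enum_name slug
  let lines := (PySem.Str.split? output "\n").getD []   -- "\n" ≠ "" so always some
  let n := importPrefixLen lines 0
  let import_lines := lines.take n        -- lines[:n], 0 ≤ n ≤ len
  let body_lines := lines.drop n          -- lines[n:]
  let k := dropBlankLen import_lines import_lines.length
  let import_lines := import_lines.take k -- import_lines[:k]
  let processed := (fusePass body_lines none).1
  -- if processed and processed[-1].strip() == ""
  let lastBlank := match processed.getLast? with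
    | some s => PySem.Str.strip s == ""
    | none => false
  let tail := if lastBlank then ["}"] else ["", "}"]
  PySem.Str.join "\n"
    (import_lines ++ ["", "enum " ++ enum_name ++ " {"] ++ processed ++ tail ++ [""])

-- ===== PRECONDITION & SPEC =====
def Spec_wrap_in_namespace (output : String) (slug : String) (out : String) : Prop := out = wrap_in_namespace_alt output slug
instance (output : String) (slug : String) (out : String) : Decidable (Spec_wrap_in_namespace output slug out) := by unfold Spec_wrap_in_namespace; infer_instance

-- ===== CLAIM (what is proved, stated in full; the proofs are below) =====
def Claim_equal_wrap_in_namespace : Prop := ∀ (output : String) (slug : String), Dom_wrap_in_namespace output slug → Spec_wrap_in_namespace output slug (wrap_in_namespace output slug)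

-- ===== LEMMAS AND PROOFS =====

-- proof-side vocabulary
-- the import-line predicate both Pythons write inline
def pvIsImp (line : String) : Bool :=
  let stripped := PySem.Str.strip line
  PySem.Str.startswith stripped "import " || PySem.Str.startswith stripped "@testable import " || stripped == ""

def pvBlank (s : String) : Bool := PySem.Str.strip s == ""

def pvF1 (line : String) : String :=
  if PySem.Str.isIn "@Test func" line && !PySem.Str.isIn "static" line then
    PySem.Str.replace line "@Test func" "@Test static func"
  else line

def pvG (raw : String) : String := if pvBlank raw then "" else pvF1 ("    " ++ raw)

def pvPrevTest : Option String → Bool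
  | some p => PySem.Str.startswith p "@Test(arguments:"
  | none => false

def pvP2line (x : String) (prev : Option String) : String :=
  if PySem.Str.startswith (PySem.Str.strip x) "func " && !PySem.Str.isIn "static" x &&
      pvPrevTest prev then
    replaceFirst x "func " "static func "
  else x

def fuseP2 : List String → Option String → List String × Option String
  | [], prev => ([], prev)
  | x :: xs, prev =>
    let y := pvP2line x prev
    let r := fuseP2 xs (if PySem.Str.strip y == "" then prev else some (PySem.Str.strip y))
    (y :: r.1, r.2)

-- a single canonical pipeline both ports are proved equal to
def pvCanon (output : String) (slug : String) : String :=
  let lines := (PySem.Str.split? output "\n").getD []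
  let imps := popTrailingBlank (lines.takeWhile pvIsImp)
  let body := lines.dropWhile pvIsImp
  let processed := (fuseP2 (body.map pvG) none).1
  let hdr := "enum " ++ slug_to_enum_name slug ++ " {"
  let lastBlank := match processed.getLast? with
    | some s => PySem.Str.strip s == ""
    | none => false
  let tail := if lastBlank then ["}"] else ["", "}"]
  PySem.Str.join "\n" (imps ++ [""] ++ [hdr] ++ processed ++ tail ++ [""])

-- B-side lemmas
theorem takeWhile_take (l : List String) (p : String → Bool) :
    l.take (l.takeWhile p).length = l.takeWhile p := by
  induction l with
  | nil => rfl
  | cons a t ih => by_cases h : p a <;> simp [h, ih]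

theorem dropWhile_drop (l : List String) (p : String → Bool) :
    l.drop (l.takeWhile p).length = l.dropWhile p := by
  induction l with
  | nil => rfl
  | cons a t ih => by_cases h : p a <;> simp [h, ih]

theorem importPrefixLen_eq (lines : List String) :
    ∀ n, n ≤ lines.length →
      importPrefixLen lines n = n + ((lines.drop n).takeWhile pvIsImp).length := by
  intro n hn
  induction hk : lines.length - n generalizing n with
  | zero =>
    have hn' : n = lines.length := by omega
    rw [importPrefixLen]
    simp [hn', List.drop_length]
  | succ k ih =>
    have hlt : n < lines.length := by omega
    rw [importPrefixLen]
    rw [dif_pos hlt]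
    have hget : lines.getD n "" = lines[n] := List.getD_eq_getElem lines "" hlt
    have hdrop : lines.drop n = lines[n] :: lines.drop (n + 1) := List.drop_eq_getElem_cons hlt
    by_cases h : pvIsImp lines[n]
    · have h' := h
      simp only [pvIsImp] at h'
      simp only [hget, h']
      simp only [if_true]
      rw [ih (n + 1) (by omega) (by omega)]
      rw [hdrop, List.takeWhile_cons, if_pos h]
      simp only [List.length_cons]
      omega
    · have h' : (let s := PySem.Str.strip lines[n];
        PySem.Str.startswith s "import " || PySem.Str.startswith s "@testable import " || s == "") = false := by
        simpa [pvIsImp] using h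
      simp only [hget]
      rw [if_neg (by simp_all)]
      rw [hdrop]
      simp [List.takeWhile_cons, h]

theorem dropBlankLen_le (l : List String) : ∀ k, dropBlankLen l k ≤ k := by
  intro k
  induction k with
  | zero => simp [dropBlankLen]
  | succ k ih =>
    rw [dropBlankLen]
    split
    · omega
    · omega

theorem dropBlankLen_append (xs : List String) (x : String) :
    ∀ k, k ≤ xs.length → dropBlankLen (xs ++ [x]) k = dropBlankLen xs k := by
  intro k hk
  induction k with
  | zero => rfl
  | succ k ih =>
    have hget : (xs ++ [x]).getD k "" = xs.getD k "" := List.getD_append xs [x] "" k (by omega)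
    rw [dropBlankLen, dropBlankLen, hget]
    split
    · exact ih (by omega)
    · rfl

theorem pop_eq_take (l : List String) : popTrailingBlank l = l.take (dropBlankLen l l.length) := by
  induction l using List.reverseRecOn with
  | nil => rw [popTrailingBlank]; simp
  | append_singleton xs x ih =>
    rw [popTrailingBlank]
    have hget : (xs ++ [x]).getD xs.length "" = x := by
      rw [List.getD_append_right xs [x] "" xs.length (le_refl _)]; simp
    by_cases h : PySem.Str.strip x == ""
    · rw [dif_pos ⟨by simp, by simpa [List.getLastD_concat] using h⟩]
      rw [List.dropLast_concat]
      rw [ih]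
      have hlen : (xs ++ [x]).length = xs.length + 1 := by simp
      rw [hlen, dropBlankLen, hget, if_pos h, dropBlankLen_append xs x _ (le_refl _)]
      rw [List.take_append_of_le_length (dropBlankLen_le xs xs.length)]
    · rw [dif_neg (by simp [List.getLastD_concat, h])]
      have hlen : (xs ++ [x]).length = xs.length + 1 := by simp
      rw [hlen, dropBlankLen, hget, if_neg h]
      rw [List.take_of_length_le (by simp)]

theorem fusePass_eq (body : List String) :
    ∀ prev, fusePass body prev = fuseP2 (body.map pvG) prev := by
  induction body with
  | nil => intro prev; rfl
  | cons raw rest ih =>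
    intro prev
    by_cases hb : PySem.Str.strip raw == ""
    · have h1 : pvG raw = "" := by simp [pvG, pvBlank, hb]
      have hx : PySem.Str.startswith (PySem.Str.strip "") "func " = false := by decide
      have h2 : pvP2line "" prev = "" := by
        simp only [pvP2line, hx, Bool.false_and]
        simp
      simp only [fusePass, List.map_cons, fuseP2, h1, h2, hb, ih]
      rfl
    · simp only [fusePass, List.map_cons, fuseP2, hb, ih]
      simp only [pvG, pvBlank, hb, if_neg, Bool.false_eq_true, if_false, pvP2line, pvF1, pvPrevTest]

-- A-side lemmas
theorem impFold_false (lines imp bod : List String) :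
    lines.foldl
      (fun (st : Bool × List String × List String) line =>
        let in_imports := st.1
        let import_lines := st.2.1
        let body_lines := st.2.2
        let stripped := PySem.Str.strip line
        if in_imports &&
            (PySem.Str.startswith stripped "import " ||
              PySem.Str.startswith stripped "@testable import " || stripped == "") then
          let import_lines := import_lines ++ [line]
          if stripped == "" && !body_lines.isEmpty then (false, import_lines, body_lines)
          else (in_imports, import_lines, body_lines)
        else (false, import_lines, body_lines ++ [line]))
      (false, imp, bod) = (false, imp, bod ++ lines) := by
  induction lines generalizing bod with
  | nil => simp
  | cons a t ih =>
    simp only [List.foldl_cons, Bool.false_and, Bool.false_eq_true, if_false]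
    rw [ih]
    simp

theorem impFold_true (lines : List String) (imp : List String) :
    (lines.foldl
      (fun (st : Bool × List String × List String) line =>
        let in_imports := st.1
        let import_lines := st.2.1
        let body_lines := st.2.2
        let stripped := PySem.Str.strip line
        if in_imports &&
            (PySem.Str.startswith stripped "import " ||
              PySem.Str.startswith stripped "@testable import " || stripped == "") then
          let import_lines := import_lines ++ [line]
          if stripped == "" && !body_lines.isEmpty then (false, import_lines, body_lines)
          else (in_imports, import_lines, body_lines)
        else (false, import_lines, body_lines ++ [line]))
      (true, imp, ([] : List String))).2
      = (imp ++ lines.takeWhile pvIsImp, lines.dropWhile pvIsImp) := by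
  induction lines generalizing imp with
  | nil => simp
  | cons a t ih =>
    by_cases h : pvIsImp a
    · have h' : (PySem.Str.startswith (PySem.Str.strip a) "import " ||
          PySem.Str.startswith (PySem.Str.strip a) "@testable import " ||
          PySem.Str.strip a == "") = true := by simpa [pvIsImp] using h
      simp only [List.foldl_cons, h', Bool.true_and, if_true, List.isEmpty_nil, Bool.not_true,
        Bool.and_false, Bool.false_eq_true, if_false]
      rw [ih (imp ++ [a])]
      simp [List.takeWhile_cons, List.dropWhile_cons, h]
    · have h' : (PySem.Str.startswith (PySem.Str.strip a) "import " ||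
          PySem.Str.startswith (PySem.Str.strip a) "@testable import " ||
          PySem.Str.strip a == "") = false := by simpa [pvIsImp] using h
      simp only [List.foldl_cons, h', Bool.true_and, Bool.false_eq_true, if_false]
      rw [impFold_false]
      simp [List.takeWhile_cons, List.dropWhile_cons, h]

-- generic: an index loop that conditionally updates entry i in place is a map
theorem foldl_set_range_aux (l : List String) (c : String → Bool) (f : String → String) :
    ∀ n, n ≤ l.length →
      (List.range n).foldl
        (fun acc i => let line := acc.getD i ""
          if c line then acc.set i (f line) else acc) l
        = (l.take n).map (fun x => if c x then f x else x) ++ l.drop n := by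
  intro n
  induction n with
  | zero => simp
  | succ n ih =>
    intro hn
    rw [List.range_succ, List.foldl_append, ih (by omega)]
    have hlen : ((l.take n).map (fun x => if c x then f x else x)).length = n := by
      simp [List.length_take]; omega
    have hdrop : l.drop n = l[n] :: l.drop (n + 1) := List.drop_eq_getElem_cons (by omega)
    have hget : (((l.take n).map (fun x => if c x then f x else x)) ++ l.drop n).getD n "" = l[n] := by
      rw [List.getD_append_right _ _ _ n (by omega), hlen, Nat.sub_self, hdrop]
      rfl
    have htake : l.take (n + 1) = l.take n ++ [l[n]] := by
      rw [List.take_succ]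
      simp [List.getElem?_eq_getElem (show n < l.length by omega)]
    simp only [List.foldl_cons, List.foldl_nil, hget]
    rw [htake, List.map_append]
    by_cases hc : c l[n]
    · rw [if_pos hc, List.set_append_right _ _ (by omega), hlen, Nat.sub_self, hdrop,
        List.set_cons_zero]
      simp [hc, List.append_assoc]
    · rw [if_neg (by simp [hc]), hdrop]
      simp [hc, List.append_assoc]

theorem p1_fold_eq (l : List String) :
    (List.range l.length).foldl
      (fun acc i =>
        let line := acc.getD i ""
        if PySem.Str.isIn "@Test func" line && !PySem.Str.isIn "static" line then
          acc.set i (PySem.Str.replace line "@Test func" "@Test static func")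
        else acc) l
      = l.map pvF1 := by
  have h := foldl_set_range_aux l
    (fun line => PySem.Str.isIn "@Test func" line && !PySem.Str.isIn "static" line)
    (fun line => PySem.Str.replace line "@Test func" "@Test static func") l.length (le_refl _)
  simp only [List.take_length, List.drop_length, List.append_nil] at h
  exact h.trans (List.map_congr_left (fun x _ => rfl))

theorem map_ind_F1 (bl : List String) :
    ((bl.map (fun line => if PySem.Str.strip line == "" then "" else "    " ++ line)).map pvF1)
      = bl.map pvG := by
  rw [List.map_map]
  apply List.map_congr_left
  intro raw _
  by_cases hb : PySem.Str.strip raw == ""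
  · simp [Function.comp, hb, pvG, pvBlank, show pvF1 "" = "" by decide]
  · simp [Function.comp, hb, pvG, pvBlank]

theorem scanPrev_congr (acc acc' : List String) :
    ∀ j, (∀ i, i < j → acc.getD i "" = acc'.getD i "") → scanPrev acc j = scanPrev acc' j := by
  intro j
  induction j with
  | zero => intro _; rfl
  | succ j ih =>
    intro h
    simp only [scanPrev, h j (by omega)]
    split
    · exact ih (fun i hi => h i (by omega))
    · rfl

theorem fuseP2_length (xs : List String) : ∀ p, (fuseP2 xs p).1.length = xs.length := by
  induction xs with
  | nil => intro p; rfl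
  | cons x t ih => intro p; simp [fuseP2, ih]

theorem fuseP2_snoc (xs : List String) (x : String) :
    ∀ p, fuseP2 (xs ++ [x]) p =
      ((fuseP2 xs p).1 ++ [pvP2line x (fuseP2 xs p).2],
        if PySem.Str.strip (pvP2line x (fuseP2 xs p).2) == "" then (fuseP2 xs p).2
        else some (PySem.Str.strip (pvP2line x (fuseP2 xs p).2))) := by
  induction xs with
  | nil => intro p; simp [fuseP2]
  | cons a t ih =>
    intro p
    simp only [List.cons_append, fuseP2, ih]

theorem strip_header_ne (name : String) :
    (PySem.Str.strip ("enum " ++ name ++ " {") == "") = false := by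
  rw [Bool.eq_false_iff]
  intro hbe
  have h := eq_of_beq hbe
  have h2 : (PySem.Str.strip ("enum " ++ name ++ " {")).toList = [] := by rw [h]; rfl
  rw [PySem.Str.toList_strip] at h2
  have h3 : ("enum " ++ name ++ " {").toList
      = 'e'::'n'::'u'::'m'::' ':: (name.toList ++ [' ', '{']) := by
    simp [String.toList_append]
  rw [h3] at h2
  simp only [PySem.Chars.strip, PySem.Chars.lstrip, PySem.Chars.rstrip] at h2
  rw [List.reverse_eq_nil_iff, List.dropWhile_eq_nil_iff] at h2
  have hd : List.dropWhile PySem.Chars.isspace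
      ('e' :: 'n' :: 'u' :: 'm' :: ' ' :: (name.toList ++ [' ', '{']))
      = 'e' :: 'n' :: 'u' :: 'm' :: ' ' :: (name.toList ++ [' ', '{']) :=
    List.dropWhile_cons_of_neg (by decide)
  have he := h2 'e' (by rw [hd]; simp)
  exact absurd he (by decide)

theorem p2_aux (l : List String) :
    ∀ n, n ≤ l.length →
      ((List.range n).foldl
        (fun acc i =>
          let line := acc.getD i ""
          let stripped := PySem.Str.strip line
          if PySem.Str.startswith stripped "func " && !PySem.Str.isIn "static" line then
            match scanPrev acc i with
            | some prev =>
              if PySem.Str.startswith prev "@Test(arguments:" then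
                acc.set i (replaceFirst line "func " "static func ")
              else acc
            | none => acc
          else acc) l
        = (fuseP2 (l.take n) none).1 ++ l.drop n)
      ∧ scanPrev
          ((List.range n).foldl
            (fun acc i =>
              let line := acc.getD i ""
              let stripped := PySem.Str.strip line
              if PySem.Str.startswith stripped "func " && !PySem.Str.isIn "static" line then
                match scanPrev acc i with
                | some prev =>
                  if PySem.Str.startswith prev "@Test(arguments:" then
                    acc.set i (replaceFirst line "func " "static func ")
                  else acc
                | none => acc
              else acc) l) n
          = (fuseP2 (l.take n) none).2 := by
  intro n
  induction n with
  | zero => intro _; exact ⟨by simp [fuseP2], rfl⟩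
  | succ n ih =>
    intro hn
    obtain ⟨hacc, hscan⟩ := ih (by omega)
    have houtlen : (fuseP2 (l.take n) none).1.length = n := by
      rw [fuseP2_length]; simp [List.length_take]; omega
    have hdrop : l.drop n = l[n] :: l.drop (n + 1) := List.drop_eq_getElem_cons (by omega)
    have htake : l.take (n + 1) = l.take n ++ [l[n]] := by
      rw [List.take_succ]; simp [List.getElem?_eq_getElem (show n < l.length by omega)]
    have hget : ((fuseP2 (l.take n) none).1 ++ l.drop n).getD n "" = l[n] := by
      rw [List.getD_append_right _ _ _ n (by omega), houtlen, Nat.sub_self, hdrop]; rfl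
    have hscan' : scanPrev ((fuseP2 (l.take n) none).1 ++ l.drop n) n = (fuseP2 (l.take n) none).2 := by
      rw [← hacc]; exact hscan
    have hcong : ∀ rest rest' : List String,
        scanPrev ((fuseP2 (l.take n) none).1 ++ rest) n
          = scanPrev ((fuseP2 (l.take n) none).1 ++ rest') n := by
      intro rest rest'
      apply scanPrev_congr
      intro i hi
      rw [List.getD_append _ _ _ i (by omega), List.getD_append _ _ _ i (by omega)]
    have hsc : ∀ (z : String) (rest : List String),
        scanPrev ((fuseP2 (l.take n) none).1 ++ z :: rest) (n + 1)
          = if PySem.Str.strip z == "" then (fuseP2 (l.take n) none).2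
            else some (PySem.Str.strip z) := by
      intro z rest
      have hgz : ((fuseP2 (l.take n) none).1 ++ z :: rest).getD n "" = z := by
        rw [List.getD_append_right _ _ _ n (by omega), houtlen, Nat.sub_self]; rfl
      simp only [scanPrev, hgz]
      cases hzb : (PySem.Str.strip z == "") with
      | true => simp only [hzb, if_true]; rw [hcong (z :: rest) (l.drop n), hscan']
      | false => simp [hzb]
    rw [List.range_succ, List.foldl_append]
    simp only [List.foldl_cons, List.foldl_nil]
    rw [hacc]
    rw [htake, fuseP2_snoc]
    simp only [hget]
    rw [hscan']
    have hset : ((fuseP2 (l.take n) none).1 ++ l.drop n).set n (replaceFirst l[n] "func " "static func ")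
        = (fuseP2 (l.take n) none).1 ++ replaceFirst l[n] "func " "static func " :: l.drop (n + 1) := by
      rw [List.set_append_right _ _ (by omega), houtlen, Nat.sub_self, hdrop, List.set_cons_zero]
    cases hc1 : (PySem.Str.startswith (PySem.Str.strip l[n]) "func " && !PySem.Str.isIn "static" l[n]) with
    | false =>
      have hy : pvP2line l[n] (fuseP2 (l.take n) none).2 = l[n] := by
        unfold pvP2line
        rw [hc1, Bool.false_and]
        simp
      rw [hy]
      simp only [hc1, Bool.false_eq_true, if_false]
      refine ⟨by rw [hdrop]; simp, ?_⟩
      rw [hdrop]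
      exact hsc l[n] (l.drop (n + 1))
    | true =>
      simp only [hc1, reduceIte]
      cases hpr : (fuseP2 (l.take n) none).2 with
      | none =>
        have hy : pvP2line l[n] none = l[n] := by
          simp only [pvP2line, pvPrevTest, Bool.and_false, Bool.false_eq_true, if_false]
        rw [hy]
        refine ⟨by rw [hdrop]; simp, ?_⟩
        rw [hdrop]
        have h := hsc l[n] (l.drop (n + 1))
        rw [hpr] at h
        exact h
      | some p =>
        cases hp : PySem.Str.startswith p "@Test(arguments:" with
        | false =>
          have hy : pvP2line l[n] (some p) = l[n] := by
            simp only [pvP2line, pvPrevTest, hp, Bool.and_false, Bool.false_eq_true, if_false]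
          rw [hy]
          simp only [hp, Bool.false_eq_true, if_false]
          refine ⟨by rw [hdrop]; simp, ?_⟩
          rw [hdrop]
          have h := hsc l[n] (l.drop (n + 1))
          rw [hpr] at h
          exact h
        | true =>
          have hy : pvP2line l[n] (some p) = replaceFirst l[n] "func " "static func " := by
            simp only [pvP2line, pvPrevTest, hc1, hp, Bool.and_self, reduceIte]
          rw [hy]
          simp only [hp, reduceIte]
          rw [hset]
          refine ⟨by simp, ?_⟩
          have h := hsc (replaceFirst l[n] "func " "static func ") (l.drop (n + 1))
          rw [hpr] at h
          exact h

theorem p2_fold_eq (l : List String) :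
    (List.range l.length).foldl
      (fun acc i =>
        let line := acc.getD i ""
        let stripped := PySem.Str.strip line
        if PySem.Str.startswith stripped "func " && !PySem.Str.isIn "static" line then
          match scanPrev acc i with
          | some prev =>
            if PySem.Str.startswith prev "@Test(arguments:" then
              acc.set i (replaceFirst line "func " "static func ")
            else acc
          | none => acc
        else acc) l
      = (fuseP2 l none).1 := by
  have h := (p2_aux l l.length (le_refl _)).1
  simpa using h

theorem A_eq_canon (output slug : String) : wrap_in_namespace output slug = pvCanon output slug := by
  simp only [wrap_in_namespace, pvCanon]
  have hi := impFold_true ((PySem.Str.split? output "\n").getD []) []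
  have h1 := congrArg Prod.fst hi
  have h2 := congrArg Prod.snd hi
  simp only [List.nil_append] at h1 h2
  rw [h1, h2, p1_fold_eq, map_ind_F1, p2_fold_eq]
  rcases List.eq_nil_or_concat
      ((fuseP2 ((((PySem.Str.split? output "\n").getD []).dropWhile pvIsImp).map pvG) none).1)
    with hP | ⟨ys, y, hP⟩
  · rw [hP]
    simp only [List.append_nil, List.getLast?_nil]
    rw [show popTrailingBlank (((PySem.Str.split? output "\n").getD []).takeWhile pvIsImp) ++ [""]
          ++ ["enum " ++ slug_to_enum_name slug ++ " {"]
        = (popTrailingBlank (((PySem.Str.split? output "\n").getD []).takeWhile pvIsImp) ++ [""])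
          ++ ["enum " ++ slug_to_enum_name slug ++ " {"] from by simp,
      List.getLast?_concat]
    simp [strip_header_ne]
  · rw [hP, List.concat_eq_append]
    rw [show popTrailingBlank (((PySem.Str.split? output "\n").getD []).takeWhile pvIsImp) ++ [""]
          ++ ["enum " ++ slug_to_enum_name slug ++ " {"] ++ (ys ++ [y])
        = (popTrailingBlank (((PySem.Str.split? output "\n").getD []).takeWhile pvIsImp) ++ [""]
          ++ ["enum " ++ slug_to_enum_name slug ++ " {"] ++ ys) ++ [y] from by simp,
      List.getLast?_concat]
    cases hy : (PySem.Str.strip y == "") with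
    | true => simp [List.getLast?_concat, hy, List.append_assoc]
    | false => simp [List.getLast?_concat, hy, List.append_assoc]

theorem B_eq_canon (output slug : String) : wrap_in_namespace_alt output slug = pvCanon output slug := by
  simp only [wrap_in_namespace_alt, pvCanon]
  have hn := importPrefixLen_eq ((PySem.Str.split? output "\n").getD []) 0 (Nat.zero_le _)
  simp only [List.drop_zero, Nat.zero_add] at hn
  rw [hn, takeWhile_take, dropWhile_drop, ← pop_eq_take, fusePass_eq]
  simp [List.append_assoc]

-- ===== VERDICT (by name: the statement is the Claim_ definition above) =====
theorem wrap_in_namespace_spec : Claim_equal_wrap_in_namespace := by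
  intro output slug _
  unfold Spec_wrap_in_namespace
  rw [A_eq_canon, B_eq_canon]
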